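-- pv_equiv track=rewrite | github.com/hiqua/isadent | indent.py | begin_position
-- ===== SOURCE A (Python) =====
-- def begin_position(s):
--     """
--     Return -1 if s is only spaces
--     >>> begin_position(" aer")
--     1
--     >>> begin_position("aer")
--     0
--     >>> begin_position("   ")
--     -1
--     """
--     i = 0
--     while(i < s.__len__() and s[i] == ' '):
--         i = i+1
--     if i == s.__len__():
--         return -1
--     else:
--         return i
-- ===== SOURCE B (Python) =====
-- def begin_position(s):
--     stripped = s.lstrip(' ')
--     if not stripped:
--         return -1
--     return len(s) - len(stripped)
-- ===== Notes on version B (the rewrite author's own statement) =====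
-- stated objective: simpler
-- what changed: Replaces the per-character index while-loop with a left strip of leading literal spaces plus a length subtraction (drop-while decomposition instead of an explicit scan counter).
import Mathlib
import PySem

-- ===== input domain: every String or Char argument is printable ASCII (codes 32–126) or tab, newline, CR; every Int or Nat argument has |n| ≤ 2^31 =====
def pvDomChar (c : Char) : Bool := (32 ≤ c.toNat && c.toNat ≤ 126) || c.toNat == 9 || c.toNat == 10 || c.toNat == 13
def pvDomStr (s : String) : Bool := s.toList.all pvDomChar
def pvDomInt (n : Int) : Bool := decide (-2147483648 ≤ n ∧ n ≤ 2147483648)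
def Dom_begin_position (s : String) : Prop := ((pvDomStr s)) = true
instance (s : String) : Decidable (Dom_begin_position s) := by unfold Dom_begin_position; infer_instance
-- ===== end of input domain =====

-- B replaces A's explicit index while-loop with lstrip(' ') and a length subtraction; return values proved equal on all inputs.

-- ===== PORT A =====
-- the while loop: advance i while i < len(s) and s[i] == ' '
def beginPosLoop (cs : List Char) (i : Nat) : Nat :=
  if h : i < cs.length ∧ cs[i]! == ' ' then
    beginPosLoop cs (i + 1)
  else
    i
termination_by cs.length - i
decreasing_by omega

def begin_position (s : String) : Int :=
  let i := beginPosLoop s.toList 0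
  if i = s.toList.length then -1 else (i : Int)

-- ===== PORT B =====
def begin_position_alt (s : String) : Int :=
  -- s.lstrip(' ') — drop leading literal spaces (exact: strips only ' ')
  let stripped := s.toList.dropWhile (fun c => c == ' ')
  if stripped.isEmpty then -1
  else (s.toList.length : Int) - (stripped.length : Int)

-- ===== PRECONDITION & SPEC =====
def Spec_begin_position (s : String) (out : Int) : Prop := out = begin_position_alt s
instance (s : String) (out : Int) : Decidable (Spec_begin_position s out) := by unfold Spec_begin_position; infer_instance

-- ===== CLAIM (what is proved, stated in full; the proofs are below) =====
def Claim_equal_begin_position : Prop := ∀ (s : String), Dom_begin_position s → Spec_begin_position s (begin_position s)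

-- ===== LEMMAS AND PROOFS =====
theorem beginPosLoop_eq (cs : List Char) (i : Nat) (h : i ≤ cs.length) :
    beginPosLoop cs i = i + ((cs.drop i).takeWhile (fun c => c == ' ')).length := by
  fun_induction beginPosLoop cs i with
  | case1 i hc ih =>
    obtain ⟨hlt, hsp⟩ := hc
    have hd : cs.drop i = cs[i] :: cs.drop (i + 1) := List.drop_eq_getElem_cons hlt
    have hspc : cs[i] = ' ' := by
      have := hsp
      rw [getElem!_pos cs i hlt] at this
      simpa using this
    rw [ih (by omega), hd, hspc]
    simp [List.takeWhile]
    omega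
  | case2 i hc =>
    rcases Nat.lt_or_ge i cs.length with hlt | hge
    · have hd : cs.drop i = cs[i] :: cs.drop (i + 1) := List.drop_eq_getElem_cons hlt
      have hns : ¬ (cs[i] == ' ') = true := by
        intro hsp
        exact hc ⟨hlt, by rw [getElem!_pos cs i hlt]; exact hsp⟩
      rw [hd]
      simp [List.takeWhile, hns]
    · have : cs.drop i = [] := List.drop_eq_nil_of_le hge
      simp [this]

-- ===== VERDICT (by name: the statement is the Claim_ definition above) =====
theorem begin_position_spec : Claim_equal_begin_position := by
  intro s _
  unfold Spec_begin_position begin_position begin_position_alt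
  set cs := s.toList with hcs
  have hloop := beginPosLoop_eq cs 0 (Nat.zero_le _)
  simp only [List.drop_zero, Nat.zero_add] at hloop
  have hsum : (cs.takeWhile (fun c => c == ' ')).length
      + (cs.dropWhile (fun c => c == ' ')).length = cs.length := by
    have h := congrArg List.length (List.takeWhile_append_dropWhile (p := fun c => c == ' ') (l := cs))
    rw [List.length_append] at h
    exact h
  have htw : (cs.takeWhile (fun c => c == ' ')).length ≤ cs.length := by omega
  by_cases hempty : (cs.dropWhile (fun c => c == ' ')).isEmpty
  · have h0 : (cs.dropWhile (fun c => c == ' ')).length = 0 := by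
      simpa [List.isEmpty_iff, List.length_eq_zero_iff] using hempty
    have : beginPosLoop cs 0 = cs.length := by omega
    simp [this, hempty]
  · have h0 : (cs.dropWhile (fun c => c == ' ')).length ≠ 0 := by
      simp [List.isEmpty_iff, List.length_eq_zero_iff] at hempty ⊢
      exact hempty
    have hne : beginPosLoop cs 0 ≠ cs.length := by omega
    simp [hempty, hloop]
    omega
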